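-- pv_equiv track=rewrite | github.com/EdgeCash/edge-equation-v1 | src/edge_equation/engines/props_prizepicks/odds_fetcher.py | _select_book
-- ===== SOURCE A (Python) =====
-- from typing import Iterable, Optional, Sequence
--
-- PREFERRED_BOOK_KEYS: tuple[str, ...] = (
--     "draftkings", "fanduel", "betmgm", "caesars",
--     "pointsbetus", "williamhill_us",
-- )
--
-- def _select_book(bookmakers: Sequence[dict]) -> Optional[dict]:
--     """Pick the highest-priority book that posted this market."""
--     if not bookmakers:
--         return None
--     by_key = {b.get("key", ""): b for b in bookmakers}
--     for preferred in PREFERRED_BOOK_KEYS: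
--         if preferred in by_key:
--             return by_key[preferred]
--     return bookmakers[0]
-- ===== SOURCE B (Python) =====
-- PREFERRED_BOOK_KEYS: tuple[str, ...] = (
--     "draftkings", "fanduel", "betmgm", "caesars",
--     "pointsbetus", "williamhill_us",
-- )
--
-- def _select_book(bookmakers):
--     """Pick the highest-priority book that posted this market (single pass)."""
--     if not bookmakers:
--         return None
--     rank = {key: i for i, key in enumerate(PREFERRED_BOOK_KEYS)}
--     best = None
--     for b in bookmakers:
--         r = rank.get(b.get("key", ""))
--         if r is not None and (best is None or r <= best[0]):
--             best = (r, b)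
--     return best[1] if best is not None else bookmakers[0]
-- ===== Notes on version B (the rewrite author's own statement) =====
-- stated objective: alternative
-- what changed: Replaced A's build-a-dict-then-scan-the-preference-list two-phase approach with a precomputed rank map and a single best-so-far pass over the bookmakers (<= on equal rank reproduces last-duplicate-wins).
import Mathlib
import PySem

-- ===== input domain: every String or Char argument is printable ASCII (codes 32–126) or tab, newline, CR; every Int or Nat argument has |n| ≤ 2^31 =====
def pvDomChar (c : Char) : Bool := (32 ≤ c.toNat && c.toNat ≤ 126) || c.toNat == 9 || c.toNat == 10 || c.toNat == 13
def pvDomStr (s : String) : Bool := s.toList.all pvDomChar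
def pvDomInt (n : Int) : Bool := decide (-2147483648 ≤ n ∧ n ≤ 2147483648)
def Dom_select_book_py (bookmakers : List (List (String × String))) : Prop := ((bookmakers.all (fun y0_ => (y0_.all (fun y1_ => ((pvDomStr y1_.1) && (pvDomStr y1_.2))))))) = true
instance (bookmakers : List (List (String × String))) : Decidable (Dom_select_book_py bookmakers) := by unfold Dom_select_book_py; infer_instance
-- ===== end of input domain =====

-- B replaces A's build-a-dict-then-scan-preferences with a rank map and one best-so-far pass (alternative decomposition, same cost).

-- ===== PORT A =====
def pvKeys : List String :=
  ["draftkings", "fanduel", "betmgm", "caesars", "pointsbetus", "williamhill_us"]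

-- b.get("key", "")
def pvGet (b : List (String × String)) : String := (PySem.Dict.mk b).getD "key" ""

-- the 'for preferred in PREFERRED_BOOK_KEYS' loop with early return
def pvPickLoop (d : PySem.Dict String (List (String × String))) :
    List String → Option (List (String × String))
  | [] => none
  | k :: ks => if d.contains k then d.get? k else pvPickLoop d ks

def select_book_py (bookmakers : List (List (String × String))) : Option (List (String × String)) :=
  if bookmakers = [] then none
  else
    let by_key := bookmakers.foldl (fun d b => d.insert (pvGet b) b) PySem.Dict.empty
    match pvPickLoop by_key pvKeys with
    | some b => some b
    | none => PySem.List.pyGet? bookmakers 0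

-- ===== PORT B =====
-- rank = {key: i for i, key in enumerate(PREFERRED_BOOK_KEYS)}
def pvRank : PySem.Dict String Int :=
  PySem.Dict.ofList ((PySem.List.enumerate
    ["draftkings", "fanduel", "betmgm", "caesars", "pointsbetus", "williamhill_us"]).map
      (fun p => (p.2, p.1)))

def pvKeyOf (b : List (String × String)) : String := (PySem.Dict.mk b).getD "key" ""

-- the loop body: r = rank.get(...); if r is not None and (best is None or r <= best[0]): best = (r, b)
def pvStep (best : Option (Int × List (String × String))) (b : List (String × String)) :
    Option (Int × List (String × String)) :=
  match pvRank.get? (pvKeyOf b), best with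
  | none, _ => best
  | some r, none => some (r, b)
  | some r, some (br, bb) => if r ≤ br then some (r, b) else some (br, bb)

def pvBestLoop : List (List (String × String)) → Option (Int × List (String × String)) →
    Option (Int × List (String × String))
  | [], best => best
  | b :: t, best => pvBestLoop t (pvStep best b)

def select_book_py_alt (bookmakers : List (List (String × String))) : Option (List (String × String)) :=
  if bookmakers = [] then none
  else
    match pvBestLoop bookmakers none with
    | some (_, b) => some b
    | none => PySem.List.pyGet? bookmakers 0

-- ===== PRECONDITION & SPEC =====
def Spec_select_book_py (bookmakers : List (List (String × String))) (out : Option (List (String × String))) : Prop := out = select_book_py_alt bookmakers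
instance (bookmakers : List (List (String × String))) (out : Option (List (String × String))) : Decidable (Spec_select_book_py bookmakers out) := by unfold Spec_select_book_py; infer_instance

-- ===== CLAIM (what is proved, stated in full; the proofs are below) =====
def Claim_equal_select_book_py : Prop := ∀ (bookmakers : List (List (String × String))), Dom_select_book_py bookmakers → Spec_select_book_py bookmakers (select_book_py bookmakers)

-- ===== LEMMAS AND PROOFS =====

-- abstraction: the earliest preferred key present in d, with its rank and value
def pvFirstHit (d : PySem.Dict String (List (String × String))) :
    Option (Int × List (String × String)) :=
  match d.get? "draftkings" with
  | some b => some (0, b)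
  | none =>
    match d.get? "fanduel" with
    | some b => some (1, b)
    | none =>
      match d.get? "betmgm" with
      | some b => some (2, b)
      | none =>
        match d.get? "caesars" with
        | some b => some (3, b)
        | none =>
          match d.get? "pointsbetus" with
          | some b => some (4, b)
          | none =>
            match d.get? "williamhill_us" with
            | some b => some (5, b)
            | none => none

theorem pvPickLoop_eq (d : PySem.Dict String (List (String × String))) :
    pvPickLoop d pvKeys = (pvFirstHit d).map (·.2) := by
  simp only [pvKeys, pvPickLoop, pvFirstHit, PySem.Dict.contains_eq_isSome_get?]
  rcases h0 : d.get? "draftkings" with _ | b0 <;>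
  rcases h1 : d.get? "fanduel" with _ | b1 <;>
  rcases h2 : d.get? "betmgm" with _ | b2 <;>
  rcases h3 : d.get? "caesars" with _ | b3 <;>
  rcases h4 : d.get? "pointsbetus" with _ | b4 <;>
  rcases h5 : d.get? "williamhill_us" with _ | b5 <;> simp_all

theorem pvRank_get (k : String) :
    pvRank.get? k =
      if k = "draftkings" then some 0 else if k = "fanduel" then some 1 else
      if k = "betmgm" then some 2 else if k = "caesars" then some 3 else
      if k = "pointsbetus" then some 4 else if k = "williamhill_us" then some 5 else none := by
  by_cases h0 : k = "draftkings"
  · subst h0; decide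
  by_cases h1 : k = "fanduel"
  · subst h1; decide
  by_cases h2 : k = "betmgm"
  · subst h2; decide
  by_cases h3 : k = "caesars"
  · subst h3; decide
  by_cases h4 : k = "pointsbetus"
  · subst h4; decide
  by_cases h5 : k = "williamhill_us"
  · subst h5; decide
  · have hmk : pvRank = PySem.Dict.mk
      [("draftkings", 0), ("fanduel", 1), ("betmgm", 2), ("caesars", 3),
       ("pointsbetus", 4), ("williamhill_us", 5)] := by decide
    rw [hmk]
    simp only [PySem.Dict.get?_mk_cons, beq_iff_eq]
    have n0 : ¬ ("draftkings" = k) := fun h => h0 h.symm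
    have n1 : ¬ ("fanduel" = k) := fun h => h1 h.symm
    have n2 : ¬ ("betmgm" = k) := fun h => h2 h.symm
    have n3 : ¬ ("caesars" = k) := fun h => h3 h.symm
    have n4 : ¬ ("pointsbetus" = k) := fun h => h4 h.symm
    have n5 : ¬ ("williamhill_us" = k) := fun h => h5 h.symm
    simp [n0, n1, n2, n3, n4, n5, h0, h1, h2, h3, h4, h5]
    exact PySem.Dict.get?_empty (κ := String) (ν := Int) (k := k)

theorem pvStep_firstHit (d : PySem.Dict String (List (String × String)))
    (b : List (String × String)) :
    pvStep (pvFirstHit d) b = pvFirstHit (d.insert (pvGet b) b) := by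
  have hk : pvKeyOf b = pvGet b := rfl
  unfold pvStep
  rw [hk, pvRank_get]
  by_cases e0 : pvGet b = "draftkings"
  · rw [e0]; simp only [pvFirstHit, PySem.Dict.get?_insert]
    rcases g0 : d.get? "draftkings" with _ | c0 <;>
    rcases g1 : d.get? "fanduel" with _ | c1 <;>
    rcases g2 : d.get? "betmgm" with _ | c2 <;>
    rcases g3 : d.get? "caesars" with _ | c3 <;>
    rcases g4 : d.get? "pointsbetus" with _ | c4 <;>
    rcases g5 : d.get? "williamhill_us" with _ | c5 <;> simp_all
  by_cases e1 : pvGet b = "fanduel"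
  · rw [e1]; simp only [pvFirstHit, PySem.Dict.get?_insert]
    rcases g0 : d.get? "draftkings" with _ | c0 <;>
    rcases g1 : d.get? "fanduel" with _ | c1 <;>
    rcases g2 : d.get? "betmgm" with _ | c2 <;>
    rcases g3 : d.get? "caesars" with _ | c3 <;>
    rcases g4 : d.get? "pointsbetus" with _ | c4 <;>
    rcases g5 : d.get? "williamhill_us" with _ | c5 <;> simp_all
  by_cases e2 : pvGet b = "betmgm"
  · rw [e2]; simp only [pvFirstHit, PySem.Dict.get?_insert]
    rcases g0 : d.get? "draftkings" with _ | c0 <;>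
    rcases g1 : d.get? "fanduel" with _ | c1 <;>
    rcases g2 : d.get? "betmgm" with _ | c2 <;>
    rcases g3 : d.get? "caesars" with _ | c3 <;>
    rcases g4 : d.get? "pointsbetus" with _ | c4 <;>
    rcases g5 : d.get? "williamhill_us" with _ | c5 <;> simp_all
  by_cases e3 : pvGet b = "caesars"
  · rw [e3]; simp only [pvFirstHit, PySem.Dict.get?_insert]
    rcases g0 : d.get? "draftkings" with _ | c0 <;>
    rcases g1 : d.get? "fanduel" with _ | c1 <;>
    rcases g2 : d.get? "betmgm" with _ | c2 <;>
    rcases g3 : d.get? "caesars" with _ | c3 <;>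
    rcases g4 : d.get? "pointsbetus" with _ | c4 <;>
    rcases g5 : d.get? "williamhill_us" with _ | c5 <;> simp_all
  by_cases e4 : pvGet b = "pointsbetus"
  · rw [e4]; simp only [pvFirstHit, PySem.Dict.get?_insert]
    rcases g0 : d.get? "draftkings" with _ | c0 <;>
    rcases g1 : d.get? "fanduel" with _ | c1 <;>
    rcases g2 : d.get? "betmgm" with _ | c2 <;>
    rcases g3 : d.get? "caesars" with _ | c3 <;>
    rcases g4 : d.get? "pointsbetus" with _ | c4 <;>
    rcases g5 : d.get? "williamhill_us" with _ | c5 <;> simp_all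
  by_cases e5 : pvGet b = "williamhill_us"
  · rw [e5]; simp only [pvFirstHit, PySem.Dict.get?_insert]
    rcases g0 : d.get? "draftkings" with _ | c0 <;>
    rcases g1 : d.get? "fanduel" with _ | c1 <;>
    rcases g2 : d.get? "betmgm" with _ | c2 <;>
    rcases g3 : d.get? "caesars" with _ | c3 <;>
    rcases g4 : d.get? "pointsbetus" with _ | c4 <;>
    rcases g5 : d.get? "williamhill_us" with _ | c5 <;> simp_all
  · have n0 : ¬ ("draftkings" = pvGet b) := fun h => e0 h.symm
    have n1 : ¬ ("fanduel" = pvGet b) := fun h => e1 h.symm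
    have n2 : ¬ ("betmgm" = pvGet b) := fun h => e2 h.symm
    have n3 : ¬ ("caesars" = pvGet b) := fun h => e3 h.symm
    have n4 : ¬ ("pointsbetus" = pvGet b) := fun h => e4 h.symm
    have n5 : ¬ ("williamhill_us" = pvGet b) := fun h => e5 h.symm
    simp only [e0, e1, e2, e3, e4, e5, if_false]
    simp only [pvFirstHit, PySem.Dict.get?_insert, n0, n1, n2, n3, n4, n5, if_false]

theorem pvBestLoop_eq (l : List (List (String × String)))
    (d : PySem.Dict String (List (String × String))) :
    pvBestLoop l (pvFirstHit d) =
      pvFirstHit (l.foldl (fun d b => d.insert (pvGet b) b) d) := by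
  induction l generalizing d with
  | nil => rfl
  | cons b t ih =>
    simp only [pvBestLoop, List.foldl_cons, pvStep_firstHit]
    exact ih _

theorem select_book_py_spec : Claim_equal_select_book_py := by
  intro bookmakers _
  unfold Spec_select_book_py select_book_py select_book_py_alt
  by_cases h : bookmakers = []
  · simp [h]
  · simp only [h, if_false]
    have hempty : (none : Option (Int × List (String × String))) =
        pvFirstHit PySem.Dict.empty := by decide
    rw [hempty, pvBestLoop_eq, pvPickLoop_eq]
    rcases pvFirstHit (bookmakers.foldl (fun d b => d.insert (pvGet b) b) PySem.Dict.empty)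
      with _ | ⟨r, bb⟩ <;> simp
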